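-- pv_equiv track=rewrite | github.com/Therealtobu/NightGuard_Api | lexer.py | _check_long_bracket
-- ===== SOURCE A (Python) =====
-- def _check_long_bracket(src, pos):
--     """Returns (level, is_long) for a potential long bracket starting at pos."""
--     if pos >= len(src) or src[pos] != '[':
--         return 0, False
--     i = pos + 1
--     level = 0
--     while i < len(src) and src[i] == '=':
--         level += 1; i += 1
--     if i < len(src) and src[i] == '[':
--         return level, True
--     return 0, False
-- ===== SOURCE B (Python) =====
-- def _check_long_bracket(src, pos):
--     """Returns (level, is_long) for a potential long bracket starting at pos."""
--     tail = src[pos:]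
--     if tail.startswith('['):
--         body = tail[1:]
--         level = len(body) - len(body.lstrip('='))
--         if body[level:level + 1] == '[':
--             return level, True
--     return 0, False
-- ===== Notes on version B (the rewrite author's own statement) =====
-- stated objective: idiomatic
-- what changed: Replaces the explicit index/counter while-loop with slicing: take tail = src[pos:], check startswith('['), measure the '=' run with len minus lstrip('='), and test the following character by slicing.
-- outside the precondition, e.g. on _check_long_bracket('[', -1): A returns (0, True), B returns (0, False); on _check_long_bracket('[', -5): A raises IndexError, B returns (0, False)
import Mathlib
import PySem

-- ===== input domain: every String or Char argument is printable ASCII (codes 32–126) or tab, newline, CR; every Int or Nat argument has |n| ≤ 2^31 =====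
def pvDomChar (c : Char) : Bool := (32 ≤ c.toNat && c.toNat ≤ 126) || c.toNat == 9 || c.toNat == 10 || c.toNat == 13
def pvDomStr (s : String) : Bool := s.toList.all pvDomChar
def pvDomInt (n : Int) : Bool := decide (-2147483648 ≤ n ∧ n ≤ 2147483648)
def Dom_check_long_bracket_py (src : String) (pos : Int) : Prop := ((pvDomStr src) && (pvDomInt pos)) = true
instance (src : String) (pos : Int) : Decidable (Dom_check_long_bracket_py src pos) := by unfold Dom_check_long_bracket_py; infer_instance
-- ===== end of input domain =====

-- B replaces A's index/counter scanning loop by slicing + startswith + an lstrip('=') run measurement (idiomatic, same cost).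

-- ===== PORT A =====
-- the 'while i < len(src) and src[i] == "=" : level += 1; i += 1' loop; returns the final (i, level)
def clbLoop (cs : List Char) (i : Int) (level : Int) : Int × Int :=
  if h : i < (cs.length : Int) ∧ PySem.List.pyGetD cs i ' ' = '=' then
    clbLoop cs (i + 1) (level + 1)
  else (i, level)
termination_by ((cs.length : Int) - i).toNat
decreasing_by omega

def check_long_bracket_py (src : String) (pos : Int) : Int × Bool :=
  let cs := src.toList
  -- src[pos] as pyGetD: inside Pre_ the index is always in range (the default is never read)
  if pos ≥ (cs.length : Int) ∨ PySem.List.pyGetD cs pos ' ' ≠ '[' then (0, false)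
  else
    let r := clbLoop cs (pos + 1) 0
    if r.1 < (cs.length : Int) ∧ PySem.List.pyGetD cs r.1 ' ' = '[' then (r.2, true)
    else (0, false)

-- ===== PORT B =====
def check_long_bracket_py_alt (src : String) (pos : Int) : Int × Bool :=
  let tail := PySem.List.slice src.toList (some pos) none        -- src[pos:]
  if PySem.Chars.startswith tail ['['] then
    let body := PySem.List.slice tail (some 1) none              -- tail[1:]
    -- body.lstrip('=') ported by hand as dropWhile (exact: stripping a single-character set)
    let level : Int := (body.length : Int) - ((body.dropWhile (· == '=')).length : Int)
    if PySem.List.slice body (some level) (some (level + 1)) = ['['] then (level, true)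
    else (0, false)
  else (0, false)

-- ===== PRECONDITION & SPEC =====
-- Pre_ excludes negative pos: for pos < -len(src) A raises IndexError, and for -len(src) ≤ pos < 0
-- A's negative-index scan can wrap from the end of the string back to index 0 — an accident of
-- Python negative indexing for a scan cursor that callers only ever pass as a non-negative offset.
def Pre_check_long_bracket_py (src : String) (pos : Int) : Prop := 0 ≤ pos
instance (src : String) (pos : Int) : Decidable (Pre_check_long_bracket_py src pos) := by unfold Pre_check_long_bracket_py; infer_instance

def pvWitness_check_long_bracket_py : String × Int := ("[==[", 0)

def Spec_check_long_bracket_py (src : String) (pos : Int) (out : Int × Bool) : Prop := out = check_long_bracket_py_alt src pos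
instance (src : String) (pos : Int) (out : Int × Bool) : Decidable (Spec_check_long_bracket_py src pos out) := by unfold Spec_check_long_bracket_py; infer_instance

-- ===== CLAIM (what is proved, stated in full; the proofs are below) =====
def Claim_equal_check_long_bracket_py : Prop := ∀ (src : String) (pos : Int), Dom_check_long_bracket_py src pos → Pre_check_long_bracket_py src pos → Spec_check_long_bracket_py src pos (check_long_bracket_py src pos)

-- ===== LEMMAS AND PROOFS =====

-- List.dropWhile drops exactly the takeWhile prefix (no named library lemma found for this).
lemma dropWhile_eq_drop_takeWhile_length (rest : List Char) (p : Char → Bool) :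
    rest.dropWhile p = rest.drop (rest.takeWhile p).length := by
  induction rest with
  | nil => rfl
  | cons c cs ih =>
    rw [List.takeWhile_cons, List.dropWhile_cons]
    by_cases h : p c = true
    · simp [h, ih]
    · simp [h]

-- A's while-loop computes the length of the '=' run starting at index i.
lemma clbLoop_eq (cs : List Char) : ∀ (n : Nat) (i level : Int), 0 ≤ i →
    ((cs.length : Int) - i).toNat ≤ n →
    clbLoop cs i level =
      (i + (((cs.drop i.toNat).takeWhile (· == '=')).length : Int),
       level + (((cs.drop i.toNat).takeWhile (· == '=')).length : Int)) := by
  intro n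
  induction n with
  | zero =>
    intro i level hi hb
    have hlen : cs.length ≤ i.toNat := by omega
    rw [clbLoop, dif_neg (by push_cast; omega), List.drop_eq_nil_of_le hlen]
    simp
  | succ n ih =>
    intro i level hi hb
    rw [clbLoop]
    by_cases h : i < (cs.length : Int) ∧ PySem.List.pyGetD cs i ' ' = '='
    · rw [dif_pos h]
      have h1 : i.toNat < cs.length := by omega
      have hdrop : cs.drop i.toNat = cs[i.toNat] :: cs.drop (i.toNat + 1) :=
        List.drop_eq_getElem_cons h1
      have hc : cs[i.toNat] = '=' := by
        have := h.2
        rwa [PySem.List.pyGetD_eq_getElem cs ' ' hi h.1] at this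
      rw [ih (i + 1) (level + 1) (by omega) (by omega)]
      have hsucc : (i + 1).toNat = i.toNat + 1 := by omega
      rw [hsucc, hdrop, List.takeWhile_cons, hc]
      simp only [beq_self_eq_true, if_true, List.length_cons, Prod.mk.injEq]
      refine ⟨by omega, by omega⟩
    · rw [dif_neg h]
      rcases (not_and_or.mp h) with hlt | hne
      · have hlen : cs.length ≤ i.toNat := by omega
        rw [List.drop_eq_nil_of_le hlen]; simp
      · by_cases h1 : i < (cs.length : Int)
        · have h1' : i.toNat < cs.length := by omega
          rw [List.drop_eq_getElem_cons h1', List.takeWhile_cons]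
          have : ¬ (cs[i.toNat] == '=') = true := by
            intro hb'
            exact hne (by rw [PySem.List.pyGetD_eq_getElem cs ' ' hi h1, beq_iff_eq.mp hb'])
          rw [if_neg this]; simp
        · have hlen : cs.length ≤ i.toNat := by omega
          rw [List.drop_eq_nil_of_le hlen]; simp

theorem check_long_bracket_py_spec : Claim_equal_check_long_bracket_py := by
  intro src pos _ hpre
  unfold Spec_check_long_bracket_py check_long_bracket_py check_long_bracket_py_alt
  have hpos : 0 ≤ pos := hpre
  dsimp only
  set cs := src.toList with hcs
  rw [PySem.List.slice_from cs hpos]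
  by_cases hend : pos ≥ (cs.length : Int)
  · -- pos past the end: tail is empty on both sides
    rw [if_pos (Or.inl hend), List.drop_eq_nil_of_le (by omega)]
    simp [PySem.Chars.startswith]
  · rw [not_le] at hend
    have hlt : pos.toNat < cs.length := by omega
    have hdrop : cs.drop pos.toNat = cs[pos.toNat] :: cs.drop (pos.toNat + 1) :=
      List.drop_eq_getElem_cons hlt
    by_cases hbr : cs[pos.toNat] = '['
    · -- src[pos] = '[' : compare the '=' run and the closing bracket test
      rw [if_neg (by
        simp only [not_or, not_le, not_not]
        exact ⟨by omega, by rw [PySem.List.pyGetD_eq_getElem cs ' ' hpos (by omega), hbr]⟩)]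
      rw [hdrop, hbr]
      have hsw : PySem.Chars.startswith ('[' :: cs.drop (pos.toNat + 1)) ['['] = true := by
        simp [PySem.Chars.startswith]
      rw [if_pos hsw, PySem.List.slice_from ('[' :: cs.drop (pos.toNat + 1)) (a := (1 : Int)) (by omega)]
      set rest := cs.drop (pos.toNat + 1) with hrest
      simp only [Int.toNat_one, List.drop_one, List.tail_cons]
      set t := (rest.takeWhile (· == '=')).length with ht
      have htle : t ≤ rest.length := by
        rw [ht]; exact (List.takeWhile_sublist _).length_le
      have hdw : rest.dropWhile (· == '=') = rest.drop t := by
        rw [ht]; exact dropWhile_eq_drop_takeWhile_length rest _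
      have hlevel : (rest.length : Int) - ((rest.dropWhile (· == '=')).length : Int) = (t : Int) := by
        rw [hdw]
        have h5 : (List.drop t rest).length = rest.length - t := by rw [List.length_drop]
        omega
      rw [hlevel]
      rw [clbLoop_eq cs (cs.length) (pos + 1) 0 (by omega) (by omega)]
      have hpn : (pos + 1).toNat = pos.toNat + 1 := by omega
      rw [hpn, ← hrest, ← ht]
      have hlen : cs.length = pos.toNat + 1 + rest.length := by
        rw [hrest, List.length_drop]; omega
      -- the two closing-bracket tests agree
      have hslice : PySem.List.slice rest (some (t : Int)) (some ((t : Int) + 1)) =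
          (rest.drop t).take 1 := by
        have := PySem.List.slice_natCast_add (xs := rest) (j := t) (n := 1)
        simpa using this
      rw [hslice]
      by_cases hin : t < rest.length
      · -- a character follows the '=' run
        have hdr : rest.drop t = rest[t] :: rest.drop (t + 1) := List.drop_eq_getElem_cons hin
        have hidx : PySem.List.pyGetD cs (pos + 1 + (t : Int)) ' ' = rest[t] := by
          rw [PySem.List.pyGetD_eq_getElem cs ' ' (by omega) (by omega)]
          have h4 : rest[t]'hin = cs[pos.toNat + 1 + t]'(by omega) := List.getElem_drop
          rw [h4]
          exact getElem_congr rfl (by omega) (by omega)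
        by_cases hcl : rest[t] = '['
        · rw [if_pos ⟨by omega, by rw [hidx, hcl]⟩, hdr, hcl]
          simp
        · rw [if_neg (by
            rintro ⟨-, hEq⟩
            exact hcl (by rw [← hidx, hEq])), hdr]
          simp only [List.take_succ_cons, List.take_zero]
          rw [if_neg (by simp [hcl])]
      · -- the '=' run reaches the end of the string
        have hteq : t = rest.length := by omega
        rw [if_neg (by rintro ⟨hlt', -⟩; omega)]
        rw [List.drop_eq_nil_of_le (by omega)]
        simp
    · -- src[pos] ≠ '[' : both return (0, False)
      rw [if_pos (Or.inr (by
        rw [PySem.List.pyGetD_eq_getElem cs ' ' hpos (by omega)]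
        exact hbr))]
      rw [hdrop]
      have hns : PySem.Chars.startswith (cs[pos.toNat] :: cs.drop (pos.toNat + 1)) ['['] = false := by
        simp [PySem.Chars.startswith, List.isPrefixOf]
        intro h; exact absurd h.symm hbr
      rw [hns]
      simp
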